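-- pv_equiv track=rewrite | github.com/dragonSwords98/grokking | permutation.py | getOrdMap
-- ===== SOURCE A (Python) =====
-- def getOrdMap(s1: str) -> dict:
--     res = {}
--     for _s1 in s1:
--         o = ord(_s1)
--         if o in res.keys():
--             res[o] += 1
--         else:
--             res[o] = 1
--
--     return res
-- ===== SOURCE B (Python) =====
-- def getOrdMap(s1: str) -> dict:
--     # Dict comprehension over the distinct ord values (dict.fromkeys keeps
--     # first-occurrence order, like A's insertion order); each key is paired with
--     # its total count in the whole string via list.count.
--     ords = [ord(c) for c in s1]
--     return {o: ords.count(o) for o in dict.fromkeys(ords)}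
-- ===== Notes on version B (the rewrite author's own statement) =====
-- stated objective: simpler
-- what changed: Replaces A's membership-test-and-increment accumulator loop with a dict comprehension over the distinct ord values (dict.fromkeys order) that pairs each key with its total count computed by list.count.
import Mathlib
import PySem

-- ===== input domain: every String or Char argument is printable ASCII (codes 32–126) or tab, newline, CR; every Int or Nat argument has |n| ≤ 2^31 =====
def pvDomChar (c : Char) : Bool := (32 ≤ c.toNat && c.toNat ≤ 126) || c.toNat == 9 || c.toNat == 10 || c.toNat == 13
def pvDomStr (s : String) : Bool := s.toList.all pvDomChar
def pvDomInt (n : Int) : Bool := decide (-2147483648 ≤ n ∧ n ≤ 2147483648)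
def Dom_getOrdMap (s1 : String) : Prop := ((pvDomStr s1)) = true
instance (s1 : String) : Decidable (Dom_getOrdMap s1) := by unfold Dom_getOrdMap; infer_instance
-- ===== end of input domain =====

-- B replaces A's membership-test-and-increment loop by a dict comprehension pairing each
-- ord value with its total count (objective: simpler; same return value, same key order).

-- ===== PORT A =====
def getOrdMap (s1 : String) : List (Int × Int) :=
  (s1.toList.foldl
    (fun res c =>
      let o : Int := (c.toNat : Int)
      if res.contains o then res.modify o 0 (· + 1) else res.insert o 1)
    PySem.Dict.empty).items

-- ===== PORT B =====
def getOrdMap_alt (s1 : String) : List (Int × Int) :=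
  let ords : List Int := s1.toList.map (fun c => (c.toNat : Int))
  ((PySem.List.dedup ords).foldl (fun res o => res.insert o ((ords.count o : Int)))
    PySem.Dict.empty).items

-- ===== PRECONDITION & SPEC =====
def Spec_getOrdMap (s1 : String) (out : List (Int × Int)) : Prop := out = getOrdMap_alt s1
instance (s1 : String) (out : List (Int × Int)) : Decidable (Spec_getOrdMap s1 out) := by unfold Spec_getOrdMap; infer_instance

-- ===== CLAIM (what is proved, stated in full; the proofs are below) =====
def Claim_equal_getOrdMap : Prop := ∀ (s1 : String), Dom_getOrdMap s1 → Spec_getOrdMap s1 (getOrdMap s1)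

-- ===== LEMMAS AND PROOFS =====

-- A's loop body coincides with the Counter step: on a present key both branches bump the
-- count; on an absent key 'insert o 1' is 'modify o 0 (+1)'.
theorem stepA_eq_modify (d : PySem.Dict Int Int) (o : Int) :
    (if d.contains o then d.modify o 0 (· + 1) else d.insert o 1) = d.modify o 0 (· + 1) := by
  by_cases h : d.contains o = true
  · simp [h]
  · simp only [Bool.not_eq_true] at h
    simp only [h, Bool.false_eq_true, if_false]
    show d.insert o 1 = d.insert o (d.getD o 0 + 1)
    rw [PySem.Dict.getD_of_not_contains (h := h)]
    norm_num

theorem foldl_fun_congr {α β : Type} (f g : α → β → α) (h : ∀ d o, f d o = g d o)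
    (l : List β) (i : α) : l.foldl f i = l.foldl g i := by
  have hfg : f = g := funext fun d => funext fun o => h d o
  rw [hfg]

theorem A_fold_eq_counter (l : List Int) :
    l.foldl (fun res o => if res.contains o then res.modify o 0 (· + 1) else res.insert o 1)
        PySem.Dict.empty = PySem.Dict.counter l := by
  rw [PySem.Dict.counter_eq_foldl]
  exact foldl_fun_congr _ _ stepA_eq_modify l _

-- lookup in B's insert loop: the value written for a present key is v k
theorem getD_foldl_insert_fun (v : Int → Int) (l : List Int) (d : PySem.Dict Int Int) (k : Int) :
    (l.foldl (fun res o => res.insert o (v o)) d).getD k 0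
      = if k ∈ l then v k else d.getD k 0 := by
  induction l generalizing d with
  | nil => simp
  | cons a t ih =>
    simp only [List.foldl_cons, ih, List.mem_cons, PySem.Dict.getD_insert]
    by_cases h1 : k ∈ t
    · simp [h1]
    · by_cases h2 : k = a <;> simp [h1, h2]

theorem getOrdMap_spec_aux (s1 : String) : getOrdMap s1 = getOrdMap_alt s1 := by
  show (s1.toList.foldl
      (fun res c =>
        if res.contains ((c.toNat : Int)) then res.modify ((c.toNat : Int)) 0 (· + 1)
        else res.insert ((c.toNat : Int)) 1)
      PySem.Dict.empty).items
    = ((PySem.List.dedup (s1.toList.map (fun c => (c.toNat : Int)))).foldl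
        (fun res o => res.insert o (((s1.toList.map (fun c => (c.toNat : Int))).count o : Int)))
        PySem.Dict.empty).items
  have h1 : s1.toList.foldl
      (fun res c =>
        if res.contains ((c.toNat : Int)) then res.modify ((c.toNat : Int)) 0 (· + 1)
        else res.insert ((c.toNat : Int)) 1)
      (PySem.Dict.empty : PySem.Dict Int Int)
      = (s1.toList.map (fun c => (c.toNat : Int))).foldl
          (fun res o => if res.contains o then res.modify o 0 (· + 1) else res.insert o 1)
          PySem.Dict.empty := by
    rw [List.foldl_map]
  refine Eq.trans (congrArg PySem.Dict.items (h1.trans (A_fold_eq_counter _))) ?_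
  rw [PySem.Dict.items_counter]
  have hnd : ((PySem.List.dedup (s1.toList.map (fun c => (c.toNat : Int)))).foldl
      (fun res o => res.insert o (((s1.toList.map (fun c => (c.toNat : Int))).count o : Int)))
      PySem.Dict.empty).keys.Nodup :=
    PySem.Dict.nodup_keys_foldl_insert _ _ _ (by simp)
  rw [PySem.Dict.items_eq_map_keys _ hnd 0, PySem.Dict.keys_foldl_insert]
  have hkeys : PySem.Set.update (PySem.Dict.empty : PySem.Dict Int Int).keys
      (PySem.List.dedup (s1.toList.map (fun c => (c.toNat : Int))))
      = PySem.Set.ofList (s1.toList.map (fun c => (c.toNat : Int))) := by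
    show PySem.Set.ofList (PySem.List.dedup (s1.toList.map (fun c => (c.toNat : Int))))
      = PySem.Set.ofList (s1.toList.map (fun c => (c.toNat : Int)))
    rw [PySem.List.dedup_eq_ofList, PySem.Set.ofList_ofList]
  rw [hkeys]
  apply List.map_congr_left
  intro k hk
  have hkmem : k ∈ PySem.List.dedup (s1.toList.map (fun c => (c.toNat : Int))) := by
    rw [PySem.List.dedup_eq_ofList]; exact hk
  rw [getD_foldl_insert_fun, if_pos hkmem]

-- ===== VERDICT (by name: the statement is the Claim_ definition above) =====
theorem getOrdMap_spec : Claim_equal_getOrdMap := by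
  intro s1 _
  exact getOrdMap_spec_aux s1
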